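-- pv_equiv track=rewrite | github.com/mouradtounsi2357/graphing_calculator | Erreur_expression_mathematique.py | var_variable_dvdr
-- ===== SOURCE A (Python) =====
-- def var_variable_dvdr(s,v):
--     sym_dr=['+','-','*','/','^','(']
--     for i in range(0,len(s)-1,1):
--         if (s[i+1]) == (v[0]):
--             var_bool=False
--             for k in range(0,len(sym_dr),1):
--                 if s[i] == sym_dr[k]:
--                     var_bool=True
--             if var_bool == False:
--                 return False
--
--     sym_dv=['+','-','*','/','^',')']
--     for i in range(0,len(s)-1,1):
--         if (s[i]) == (v[0]):
--             var_bool=False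
--             for k in range(0,len(sym_dv),1):
--                 if s[i+1] == sym_dv[k]:
--                     var_bool=True
--             if var_bool == False:
--                 return False
--
--     return True
-- ===== SOURCE B (Python) =====
-- def var_variable_dvdr(s, v):
--     if len(s) < 2:
--         return True
--     c = v[0]
--     n = len(s)
--     j = s.find(c)
--     while j != -1:
--         if j > 0 and s[j - 1] not in '+-*/^(':
--             return False
--         if j < n - 1 and s[j + 1] not in '+-*/^)':
--             return False
--         j = s.find(c, j + 1)
--     return True
-- ===== Notes on version B (the rewrite author's own statement) =====
-- stated objective: alternative
-- what changed: Replaces A's two full left-to-right passes over every adjacent index pair (each with an inner flag-setting scan over a symbol list) by an occurrence-centered str.find loop that jumps from one occurrence of v[0] to the next and checks both neighbors of each occurrence at once.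
import Mathlib
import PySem

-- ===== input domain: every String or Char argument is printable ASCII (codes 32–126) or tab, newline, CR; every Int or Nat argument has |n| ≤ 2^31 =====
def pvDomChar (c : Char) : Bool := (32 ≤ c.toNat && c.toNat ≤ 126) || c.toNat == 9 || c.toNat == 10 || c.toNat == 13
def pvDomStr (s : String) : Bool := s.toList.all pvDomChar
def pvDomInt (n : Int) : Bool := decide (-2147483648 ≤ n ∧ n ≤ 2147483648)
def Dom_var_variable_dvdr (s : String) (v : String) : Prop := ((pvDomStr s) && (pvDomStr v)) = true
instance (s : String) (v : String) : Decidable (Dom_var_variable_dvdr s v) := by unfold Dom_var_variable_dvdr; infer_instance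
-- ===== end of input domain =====

-- B replaces A's two full adjacent-pair passes (each with an inner flag-setting scan over
-- a symbol list) by an occurrence-centered str.find loop that jumps from one occurrence of
-- v[0] to the next and checks both neighbors there; objective: alternative (same cost).

-- ===== PORT A =====
-- literal port of A: two passes over range(0, len(s)-1), each with an inner loop
-- over the symbol list setting var_bool, early-return-False = List.all.
def pvSymDr : List Char := ['+', '-', '*', '/', '^', '(']
def pvSymDv : List Char := ['+', '-', '*', '/', '^', ')']

def var_variable_dvdr (s : String) (v : String) : Bool :=
  let cs := s.toList
  let pass1 := (List.range (cs.length - 1)).all (fun i =>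
    if PySem.List.pyGet? cs ((i : Int) + 1) == PySem.List.pyGet? v.toList 0 then
      pvSymDr.foldl (fun b c => if PySem.List.pyGet? cs (i : Int) == some c then true else b) false
    else true)
  if pass1 then
    (List.range (cs.length - 1)).all (fun i =>
      if PySem.List.pyGet? cs (i : Int) == PySem.List.pyGet? v.toList 0 then
        pvSymDv.foldl (fun b c => if PySem.List.pyGet? cs ((i : Int) + 1) == some c then true else b) false
      else true)
    else false

-- ===== PORT B =====
-- port of Source B's while loop over j = s.find(c) / s.find(c, j+1); fuel only makes the
-- recursion structural (cs.length + 1 iterations always suffice: the start index strictly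
-- grows and find fails once it passes the end).
def pvAltLoop (cs : List Char) (c : Char) (st : Nat) (fuel : Nat) : Bool :=
  match fuel with
  | 0 => true
  | Nat.succ f =>
    let j := PySem.Chars.findFrom cs [c] (st : Int) none
    if j = -1 then true
    else
      let jn := j.toNat
      if decide (0 < jn) && !(pvSymDr.contains (cs.getD (jn - 1) ' ')) then false
      else if decide (jn < cs.length - 1) && !(pvSymDv.contains (cs.getD (jn + 1) ' ')) then false
      else pvAltLoop cs c (jn + 1) f

def var_variable_dvdr_alt (s : String) (v : String) : Bool :=
  let cs := s.toList
  if cs.length < 2 then true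
  else
    -- c = v[0]; the IndexError on empty v is excluded by Pre_ (A raises there too)
    let c := v.toList.headD ' '
    pvAltLoop cs c 0 (cs.length + 1)

-- ===== PRECONDITION & SPEC =====
-- Pre_ excludes exactly the inputs where A raises: v = "" together with len(s) ≥ 2
-- (then A evaluates v[0] and raises IndexError; B raises there too).
def Pre_var_variable_dvdr (s : String) (v : String) : Prop := v ≠ "" ∨ s.length < 2
instance (s : String) (v : String) : Decidable (Pre_var_variable_dvdr s v) := by
  unfold Pre_var_variable_dvdr; infer_instance

def pvWitness_var_variable_dvdr : String × String := ("x+x", "x")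

def Spec_var_variable_dvdr (s : String) (v : String) (out : Bool) : Prop := out = var_variable_dvdr_alt s v
instance (s : String) (v : String) (out : Bool) : Decidable (Spec_var_variable_dvdr s v out) := by unfold Spec_var_variable_dvdr; infer_instance

-- ===== CLAIM (what is proved, stated in full; the proofs are below) =====
def Claim_equal_var_variable_dvdr : Prop := ∀ (s : String) (v : String), Dom_var_variable_dvdr s v → Pre_var_variable_dvdr s v → Spec_var_variable_dvdr s v (var_variable_dvdr s v)

-- ===== LEMMAS AND PROOFS =====

-- "occurrence j of c is correctly delimited": left neighbor in sym_dr, right in sym_dv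
def pvOkAt (cs : List Char) (j : Nat) : Prop :=
  (0 < j → pvSymDr.contains (cs.getD (j - 1) ' ') = true)
  ∧ (j < cs.length - 1 → pvSymDv.contains (cs.getD (j + 1) ' ') = true)

def pvAllOk (cs : List Char) (c : Char) (st : Nat) : Prop :=
  ∀ j, st ≤ j → j < cs.length → cs.getD j ' ' = c → pvOkAt cs j

theorem pv_prefix_single_drop (cs : List Char) (c : Char) (j : Nat) :
    [c] <+: cs.drop j ↔ (j < cs.length ∧ cs.getD j ' ' = c) := by
  constructor
  · rintro ⟨t, ht⟩
    have hget : cs[j]? = some c := by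
      have : (cs.drop j)[0]? = some c := by rw [← ht]; rfl
      rwa [List.getElem?_drop] at this
    have hj : j < cs.length := by
      by_contra h
      rw [List.getElem?_eq_none_iff.mpr (by omega)] at hget
      simp at hget
    refine ⟨hj, ?_⟩
    rw [List.getD_eq_getElem?_getD, hget]; rfl
  · rintro ⟨hj, hc⟩
    have : cs.drop j = cs[j] :: cs.drop (j + 1) := List.drop_eq_getElem_cons hj
    rw [this]
    have : cs[j] = c := by
      rw [List.getD_eq_getElem?_getD, List.getElem?_eq_getElem hj] at hc
      simpa using hc
    rw [this]
    exact ⟨cs.drop (j + 1), rfl⟩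

theorem pv_mem_of_getD (cs : List Char) (c : Char) (st j : Nat)
    (h1 : st ≤ j) (h2 : j < cs.length) (h3 : cs.getD j ' ' = c) : c ∈ cs.drop st := by
  obtain ⟨t, ht⟩ := (pv_prefix_single_drop cs c j).mpr ⟨h2, h3⟩
  have hmem : c ∈ cs.drop j := by rw [← ht]; simp
  have hdj : cs.drop j = List.drop (j - st) (cs.drop st) := by
    rw [List.drop_drop]; congr 1; omega
  rw [hdj] at hmem
  exact List.mem_of_mem_drop hmem

-- the find loop of B computes "every occurrence ≥ st is correctly delimited"
theorem pvAltLoop_iff (cs : List Char) (c : Char) :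
    ∀ fuel st, st ≤ cs.length → cs.length - st < fuel →
      (pvAltLoop cs c st fuel = true ↔ pvAllOk cs c st) := by
  intro fuel
  induction fuel with
  | zero => intro st _ h; omega
  | succ f ih =>
    intro st hst hfuel
    by_cases hj : PySem.Chars.findFrom cs [c] (st : Int) none = -1
    · simp only [pvAltLoop, hj]
      constructor
      · intro _ j h1 h2 h3
        exfalso
        have hni := (PySem.Chars.findFrom_natCast_eq_neg_one_iff cs [c] st hst).mp hj
        exact hni ((List.singleton_infix_iff c (cs.drop st)).mpr
          (pv_mem_of_getD cs c st j h1 h2 h3))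
      · intro _; rfl
    · obtain ⟨hge, hpref, hmin⟩ := PySem.Chars.findFrom_natCast_spec cs [c] st hst hj
      set j := PySem.Chars.findFrom cs [c] (st : Int) none with hjdef
      obtain ⟨hjlt, hjc⟩ := (pv_prefix_single_drop cs c j.toNat).mp hpref
      have hstjn : st ≤ j.toNat := by
        have h0 : (0:Int) ≤ (st : Int) := by positivity
        omega
      have hstep : pvAltLoop cs c st (Nat.succ f)
          = (if j = -1 then true
             else if decide (0 < j.toNat) && !(pvSymDr.contains (cs.getD (j.toNat - 1) ' ')) then false
             else if decide (j.toNat < cs.length - 1) && !(pvSymDv.contains (cs.getD (j.toNat + 1) ' ')) then false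
             else pvAltLoop cs c (j.toNat + 1) f) := rfl
      rw [hstep, if_neg hj]
      by_cases b1 : (decide (0 < j.toNat) && !(pvSymDr.contains (cs.getD (j.toNat - 1) ' '))) = true
      · rw [if_pos b1]
        simp only [Bool.false_eq_true, false_iff]
        intro hall
        rw [Bool.and_eq_true, decide_eq_true_eq, Bool.not_eq_true'] at b1
        have := (hall j.toNat hstjn hjlt hjc).1 b1.1
        rw [b1.2] at this
        exact Bool.noConfusion this
      · rw [if_neg b1]
        by_cases b2 : (decide (j.toNat < cs.length - 1) && !(pvSymDv.contains (cs.getD (j.toNat + 1) ' '))) = true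
        · rw [if_pos b2]
          simp only [Bool.false_eq_true, false_iff]
          intro hall
          rw [Bool.and_eq_true, decide_eq_true_eq, Bool.not_eq_true'] at b2
          have := (hall j.toNat hstjn hjlt hjc).2 b2.1
          rw [b2.2] at this
          exact Bool.noConfusion this
        · rw [if_neg b2, ih (j.toNat + 1) (by omega) (by omega)]
          simp only [Bool.and_eq_true, decide_eq_true_eq, Bool.not_eq_true', not_and,
            Bool.not_eq_false] at b1 b2
          constructor
          · intro hall k h1 h2 h3
            by_cases hcase : j.toNat + 1 ≤ k
            · exact hall k hcase h2 h3
            · by_cases heq : k = j.toNat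
              · subst heq
                exact ⟨fun hpos => b1 hpos, fun hlt => b2 hlt⟩
              · exact absurd ((pv_prefix_single_drop cs c k).mpr ⟨h2, h3⟩)
                  (hmin k h1 (by omega))
          · intro hall k h1 h2 h3
            exact hall k (by omega) h2 h3

-- characterization of A's two passes
theorem pv_foldl_any (x : Option Char) (l : List Char) (b : Bool) :
    l.foldl (fun b c => if x == some c then true else b) b
      = (b || l.any (fun c => x == some c)) := by
  induction l generalizing b with
  | nil => simp
  | cons h t ih =>
      simp only [List.foldl_cons, List.any_cons, ih]
      by_cases hx : x == some h <;> simp [hx]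

theorem pv_pyGet_getD (cs : List Char) (i : Nat) (h : i < cs.length) :
    PySem.List.pyGet? cs (i : Int) = some (cs.getD i ' ') := by
  rw [PySem.List.pyGet?_natCast, List.getElem?_eq_getElem h,
    List.getD_eq_getElem?_getD, List.getElem?_eq_getElem h]
  rfl

theorem pv_A_char (s v : String) (c : Char) (t : List Char)
    (hv : v.toList = c :: t) (hlen : 2 ≤ s.toList.length) :
    (var_variable_dvdr s v = true)
      ↔ ∀ i, i < s.toList.length - 1 →
          ((s.toList.getD (i + 1) ' ' = c → pvSymDr.contains (s.toList.getD i ' ') = true)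
           ∧ (s.toList.getD i ' ' = c → pvSymDv.contains (s.toList.getD (i + 1) ' ') = true)) := by
  unfold var_variable_dvdr
  have hv0 : PySem.List.pyGet? v.toList 0 = some c := by
    rw [hv]; exact PySem.List.pyGet?_zero_cons _ _
  set cs := s.toList with hcs
  simp only [hv0]
  have hP1 : ∀ i, i < cs.length - 1 →
      (((if PySem.List.pyGet? cs ((i : Int) + 1) == some c then
          pvSymDr.foldl (fun b c' => if PySem.List.pyGet? cs (i : Int) == some c' then true else b) false
        else true) = true)
        ↔ (cs.getD (i + 1) ' ' = c → pvSymDr.contains (cs.getD i ' ') = true)) := by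
    intro i h
    have e1 : PySem.List.pyGet? cs ((i : Int) + 1) = some (cs.getD (i + 1) ' ') := by
      have : ((i : Int) + 1) = ((i + 1 : Nat) : Int) := by push_cast; ring
      rw [this]; exact pv_pyGet_getD cs (i + 1) (by omega)
    have e2 : PySem.List.pyGet? cs (i : Int) = some (cs.getD i ' ') :=
      pv_pyGet_getD cs i (by omega)
    rw [e1, e2, pv_foldl_any]
    simp only [beq_iff_eq, Option.some.injEq, List.any_eq, Bool.false_or,
      List.contains_iff_mem, Bool.ite_eq_true_distrib]
    split_ifs with hc <;> simp <;> tauto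
  have hP2 : ∀ i, i < cs.length - 1 →
      (((if PySem.List.pyGet? cs (i : Int) == some c then
          pvSymDv.foldl (fun b c' => if PySem.List.pyGet? cs ((i : Int) + 1) == some c' then true else b) false
        else true) = true)
        ↔ (cs.getD i ' ' = c → pvSymDv.contains (cs.getD (i + 1) ' ') = true)) := by
    intro i h
    have e1 : PySem.List.pyGet? cs ((i : Int) + 1) = some (cs.getD (i + 1) ' ') := by
      have : ((i : Int) + 1) = ((i + 1 : Nat) : Int) := by push_cast; ring
      rw [this]; exact pv_pyGet_getD cs (i + 1) (by omega)
    have e2 : PySem.List.pyGet? cs (i : Int) = some (cs.getD i ' ') :=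
      pv_pyGet_getD cs i (by omega)
    rw [e1, e2, pv_foldl_any]
    simp only [beq_iff_eq, Option.some.injEq, List.any_eq, Bool.false_or,
      List.contains_iff_mem, Bool.ite_eq_true_distrib]
    split_ifs with hc <;> simp <;> tauto
  constructor
  · intro hA i hi
    rw [Bool.ite_eq_true_distrib] at hA
    by_cases hp1 : (List.range (cs.length - 1)).all (fun i =>
        if PySem.List.pyGet? cs ((i : Int) + 1) == some c then
          pvSymDr.foldl (fun b c' => if PySem.List.pyGet? cs (i : Int) == some c' then true else b) false
        else true) = true
    · rw [if_pos hp1] at hA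
      rw [List.all_eq_true] at hA hp1
      exact ⟨(hP1 i hi).mp (hp1 i (by simp; omega)), (hP2 i hi).mp (hA i (by simp; omega))⟩
    · rw [if_neg hp1] at hA; exact absurd hA (by simp)
  · intro hQ
    have hp1 : (List.range (cs.length - 1)).all (fun i =>
        if PySem.List.pyGet? cs ((i : Int) + 1) == some c then
          pvSymDr.foldl (fun b c' => if PySem.List.pyGet? cs (i : Int) == some c' then true else b) false
        else true) = true := by
      rw [List.all_eq_true]; intro i hi
      rw [List.mem_range] at hi
      exact (hP1 i hi).mpr (hQ i hi).1
    rw [if_pos hp1, List.all_eq_true]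
    intro i hi
    rw [List.mem_range] at hi
    exact (hP2 i hi).mpr (hQ i hi).2

-- A's pair-indexed condition = B's occurrence-indexed condition
theorem pv_bridge (cs : List Char) (c : Char) :
    (∀ i, i < cs.length - 1 →
        ((cs.getD (i + 1) ' ' = c → pvSymDr.contains (cs.getD i ' ') = true)
         ∧ (cs.getD i ' ' = c → pvSymDv.contains (cs.getD (i + 1) ' ') = true)))
      ↔ pvAllOk cs c 0 := by
  constructor
  · intro hQ j _ hj hc
    constructor
    · intro hpos
      have hi : j - 1 < cs.length - 1 := by omega
      have e : j - 1 + 1 = j := by omega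
      have := (hQ (j - 1) hi).1
      rw [e] at this
      exact this hc
    · intro hlt
      exact (hQ j hlt).2 hc
  · intro hall i hi
    constructor
    · intro hc
      have := (hall (i + 1) (by omega) (by omega) hc).1 (by omega)
      simpa using this
    · intro hc
      exact (hall i (by omega) (by omega) hc).2 hi

-- ===== VERDICT (by name: the statement is the Claim_ definition above) =====

theorem var_variable_dvdr_spec : Claim_equal_var_variable_dvdr := by
  intro s v hdom hpre
  unfold Spec_var_variable_dvdr
  by_cases hlen : s.toList.length < 2
  · -- both sides are trivially true: A's ranges are empty, B's guard fires
    unfold var_variable_dvdr var_variable_dvdr_alt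
    have hsl : s.length = s.toList.length := by simp
    have h0 : s.length - 1 = 0 := by omega
    have h1 : s.length ≤ 1 := by omega
    simp [h0, h1]
  · have hlen2 : 2 ≤ s.toList.length := by omega
    have hv : v ≠ "" := by
      rcases hpre with hv | hs
      · exact hv
      · exfalso
        have : s.length = s.toList.length := by simp
        omega
    obtain ⟨c, t, hct⟩ : ∃ c t, v.toList = c :: t := by
      cases hvl : v.toList with
      | nil => exact absurd (by rwa [String.toList_eq_nil_iff] at hvl) hv
      | cons c t => exact ⟨c, t, rfl⟩
    have hBval : var_variable_dvdr_alt s v = pvAltLoop s.toList c 0 (s.toList.length + 1) := by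
      unfold var_variable_dvdr_alt
      rw [if_neg (by omega)]
      rw [hct]
      rfl
    rw [Bool.eq_iff_iff, hBval,
      pvAltLoop_iff s.toList c (s.toList.length + 1) 0 (by omega) (by omega),
      pv_A_char s v c t hct hlen2]
    exact pv_bridge s.toList c
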